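-- pv_equiv track=rewrite | github.com/samuellachisa/brownfield-cartographer | src/analyzers/sql_lineage.py | _resolve_cte_to_physical
-- ===== SOURCE A (Python) =====
-- from typing import Dict, Iterable, List, Tuple, Optional, Set
--
-- def _resolve_cte_to_physical(
--     cte_names: Set[str],
--     cte_dependencies: Dict[str, Set[str]],
-- ) -> Dict[str, List[str]]:
--     """Resolve each CTE to all physical tables (transitive)."""
--     physical = {t for t in cte_names if t not in cte_dependencies}
--     resolved: Dict[str, List[str]] = {}
--
--     def _resolve(name: str) -> Set[str]:
--         if name in resolved:
--             return set(resolved[name])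
--         deps = cte_dependencies.get(name, set())
--         out: Set[str] = set()
--         for d in deps:
--             if d in cte_dependencies:
--                 out |= _resolve(d)
--             else:
--                 out.add(d)
--         resolved[name] = sorted(out)
--         return out
--
--     for name in cte_names:
--         if name in cte_dependencies:
--             _resolve(name)
--     return resolved
-- ===== SOURCE B (Python) =====
-- def _resolve_cte_to_physical(cte_names, cte_dependencies):
--     """Resolve each CTE to all physical tables (transitive); iterative post-order DFS."""
--     resolved = {}
--     for start in cte_names:
--         if start not in cte_dependencies:
--             continue
--         stack = [start]
--         while stack:
--             name = stack[-1]
--             if name in resolved: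
--                 stack.pop()
--                 continue
--             pending = next((d for d in cte_dependencies[name]
--                             if d in cte_dependencies and d not in resolved), None)
--             if pending is not None:
--                 stack.append(pending)
--                 continue
--             out = set()
--             for d in cte_dependencies[name]:
--                 if d in cte_dependencies:
--                     out |= set(resolved[d])
--                 else:
--                     out.add(d)
--             resolved[name] = sorted(out)
--             stack.pop()
--     return resolved
-- ===== Notes on version B (the rewrite author's own statement) =====
-- stated objective: alternative
-- what changed: A's memoized recursive _resolve helper is replaced by an iterative post-order DFS with an explicit stack (peek, push first unresolved CTE dependency, finalize when none pending) over the same memo dict, producing identical resolved entries; A's unused `physical` set is dropped.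
import Mathlib
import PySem

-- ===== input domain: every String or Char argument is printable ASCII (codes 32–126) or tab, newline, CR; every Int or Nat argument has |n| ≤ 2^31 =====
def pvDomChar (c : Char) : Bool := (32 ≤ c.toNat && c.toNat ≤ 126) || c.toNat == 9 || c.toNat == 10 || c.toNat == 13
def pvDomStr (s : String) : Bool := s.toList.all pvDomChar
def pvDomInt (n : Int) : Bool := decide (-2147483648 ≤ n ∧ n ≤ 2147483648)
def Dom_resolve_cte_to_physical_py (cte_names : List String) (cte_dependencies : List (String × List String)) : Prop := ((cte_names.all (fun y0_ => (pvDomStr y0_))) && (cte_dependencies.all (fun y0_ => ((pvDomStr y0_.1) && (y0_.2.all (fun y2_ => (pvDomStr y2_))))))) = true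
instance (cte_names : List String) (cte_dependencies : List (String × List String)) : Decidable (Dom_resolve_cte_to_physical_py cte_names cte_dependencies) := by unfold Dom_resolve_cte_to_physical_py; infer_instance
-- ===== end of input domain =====

-- B replaces A's memoized recursion by an iterative post-order DFS with an explicit stack (objective: alternative;
-- same memo dict, same resolved entries in the same insertion order). A iterates over Python sets (cte_names, dep
-- sets); the stored values are order-independent, and dict outputs are compared ignoring key order.

-- ===== PORT A =====
-- A's recursive `_resolve` with the dict-held memo; the Nat argument is a recursion-depth guard (Python raises
-- RecursionError on cyclic input; the guard returns none there, outside Pre_).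
mutual
def pvAResolve (D : PySem.Dict String (List String)) :
    Nat → String → PySem.Dict String (List String) →
    Option (PySem.Set String × PySem.Dict String (List String))
  | 0, _, _ => none
  | fuel+1, name, resolved =>
    match resolved.get? name with
    | some v => some (PySem.Set.ofList v, resolved)          -- if name in resolved: return set(resolved[name])
    | none =>
      match pvALoop D fuel (D.getD name []) PySem.Set.empty resolved with
      | none => none
      | some (out, r) =>
          -- resolved[name] = sorted(out); return out
          some (out, r.insert name (PySem.List.sorted out (fun x => x)))
termination_by fuel name resolved => (fuel, 0)

-- the `for d in deps` loop of `_resolve`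
def pvALoop (D : PySem.Dict String (List String)) :
    Nat → List String → PySem.Set String → PySem.Dict String (List String) →
    Option (PySem.Set String × PySem.Dict String (List String))
  | _, [], out, r => some (out, r)
  | fuel, d :: ds, out, r =>
    if D.contains d then
      match pvAResolve D fuel d r with
      | none => none
      | some (s, r') => pvALoop D fuel ds (PySem.Set.union out s) r'   -- out |= _resolve(d)
    else pvALoop D fuel ds (PySem.Set.add out d) r                     -- out.add(d)
termination_by fuel ds out r => (fuel, ds.length + 1)
end

-- A's `physical` set is computed but never used by A; it is not ported.
def resolve_cte_to_physical_py (cte_names : List String) (cte_dependencies : List (String × List String)) : List (String × List String) :=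
  let D := PySem.Dict.ofList cte_dependencies
  (cte_names.foldl (fun resolved name =>
      if D.contains name then
        match pvAResolve D (cte_dependencies.length + 2) name resolved with
        | some (_, r') => r'
        | none => resolved       -- depth guard exhausted: unreachable under Pre_
      else resolved)
    PySem.Dict.empty).items

-- ===== PORT B =====
-- first CTE dependency of the scanned list that is not resolved yet (the `next(...)` scan in Source B)
def pvBFirstPending (D resolved : PySem.Dict String (List String)) : List String → Option String
  | [] => none
  | d :: ds =>
    if D.contains d && !(resolved.contains d) then some d
    else pvBFirstPending D resolved ds

-- one step of Source B's `out` accumulation (out |= set(resolved[d]) for CTE deps, out.add(d) for physical ones)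
def pvBContribF (D resolved : PySem.Dict String (List String)) (out : PySem.Set String) (d : String) : PySem.Set String :=
  if D.contains d then PySem.Set.union out (PySem.Set.ofList (resolved.getD d []))
  else PySem.Set.add out d
-- sorted(out) for a node all of whose CTE deps are resolved (resolved[d] always present there; getD is exact)
def pvBFinal (D resolved : PySem.Dict String (List String)) (name : String) : List String :=
  PySem.List.sorted ((D.getD name []).foldl (pvBContribF D resolved) PySem.Set.empty) (fun x => x)

-- Source B's `while stack:` loop; Nat = loop-iteration guard (the loop does not terminate on cyclic input, outside Pre_)
def pvBStep (D : PySem.Dict String (List String)) :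
    Nat → List String → PySem.Dict String (List String) →
    Option (PySem.Dict String (List String))
  | 0, _, _ => none
  | _+1, [], r => some r
  | fuel+1, name :: stack, r =>
    if r.contains name then pvBStep D fuel stack r
    else
      match pvBFirstPending D r (D.getD name []) with
      | some d => pvBStep D fuel (d :: name :: stack) r
      | none => pvBStep D fuel stack (r.insert name (pvBFinal D r name))

def resolve_cte_to_physical_py_alt (cte_names : List String) (cte_dependencies : List (String × List String)) : List (String × List String) :=
  let D := PySem.Dict.ofList cte_dependencies
  (cte_names.foldl (fun resolved name =>
      if D.contains name then
        match pvBStep D (3 * cte_dependencies.length + 8) [name] resolved with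
        | some r' => r'
        | none => resolved       -- iteration guard exhausted: unreachable under Pre_
      else resolved)
    PySem.Dict.empty).items

-- ===== PRECONDITION & SPEC =====
-- CTE children of a node: its listed dependencies that are themselves keys of the dependency dict
def pvChildF (D : PySem.Dict String (List String)) (a : String) : Finset String :=
  ((D.getD a []).filter (fun d => D.contains d)).toFinset
-- n-fold expansion of the CTE-descendant set
def pvC (D : PySem.Dict String (List String)) : Nat → String → Finset String
  | 0, a => pvChildF D a
  | n+1, a => pvC D n a ∪ (pvC D n a).biUnion (pvChildF D)
-- all CTE nodes transitively reachable from a (the iteration is stationary after #keys steps)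
def pvDset (D : PySem.Dict String (List String)) (a : String) : Finset String :=
  pvC D (D.keys.toFinset.card) a

-- Pre_: no CTE node reachable from a processed start depends (transitively) on itself — exactly the inputs on
-- which A's recursion terminates; on a reachable cycle A raises RecursionError (and Source B's loop does not return).
def Pre_resolve_cte_to_physical_py (cte_names : List String) (cte_dependencies : List (String × List String)) : Prop :=
  ∀ s ∈ cte_names, (PySem.Dict.ofList cte_dependencies).contains s = true →
    ∀ k ∈ insert s (pvDset (PySem.Dict.ofList cte_dependencies) s),
      k ∉ pvDset (PySem.Dict.ofList cte_dependencies) k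
instance (cte_names : List String) (cte_dependencies : List (String × List String)) : Decidable (Pre_resolve_cte_to_physical_py cte_names cte_dependencies) := by unfold Pre_resolve_cte_to_physical_py; infer_instance

def pvWitness_resolve_cte_to_physical_py : List String × (List (String × List String)) :=
  (["a", "b", "c"], [("a", ["b", "x"]), ("b", ["y", "z"])])

def Spec_resolve_cte_to_physical_py (cte_names : List String) (cte_dependencies : List (String × List String)) (out : List (String × List String)) : Prop := out = resolve_cte_to_physical_py_alt cte_names cte_dependencies
instance (cte_names : List String) (cte_dependencies : List (String × List String)) (out : List (String × List String)) : Decidable (Spec_resolve_cte_to_physical_py cte_names cte_dependencies out) := by unfold Spec_resolve_cte_to_physical_py; infer_instance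

-- ===== CLAIM (what is proved, stated in full; the proofs are below) =====
def Claim_equal_resolve_cte_to_physical_py : Prop := ∀ (cte_names : List String) (cte_dependencies : List (String × List String)), Dom_resolve_cte_to_physical_py cte_names cte_dependencies → Pre_resolve_cte_to_physical_py cte_names cte_dependencies → Spec_resolve_cte_to_physical_py cte_names cte_dependencies (resolve_cte_to_physical_py cte_names cte_dependencies)

-- ===== LEMMAS AND PROOFS =====

-- resolved-keys-so-far measure: unresolved nodes among name and its CTE descendants
def pvMu (D r : PySem.Dict String (List String)) (name : String) : Nat :=
  ((insert name (pvDset D name)).filter (fun k => r.contains k = false)).card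

-- invariant of A's memo: a resolved node has all its CTE descendants resolved
def pvInv2 (D r : PySem.Dict String (List String)) : Prop :=
  ∀ k, r.contains k = true → ∀ x ∈ pvDset D k, r.contains x = true

-- joint postcondition of one A-recursion / one B-DFS-excursion from `name` on memo `r`
structure PvOut (D : PySem.Dict String (List String)) (name : String)
    (r : PySem.Dict String (List String)) (v : PySem.Set String)
    (r' : PySem.Dict String (List String)) (c : Nat) : Prop where
  runA : ∀ f, pvMu D r name + 1 ≤ f → pvAResolve D f name r = some (v, r')
  runB : ∀ g stack, pvBStep D (c + g) (name :: stack) r = pvBStep D g stack r'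
  cres : r.contains name = true → c = 1 ∧ r' = r
  cunres : r.contains name = false → c + 2 ≤ 3 * pvMu D r name
  pres : ∀ k, r.contains k = true → r'.get? k = r.get? k
  sidelocal : ∀ k, r'.contains k = true → r.contains k = true ∨ k ∈ insert name (pvDset D name)
  compl : ∀ k ∈ insert name (pvDset D name), r'.contains k = true
  inv2 : pvInv2 D r'
  value : ∃ w, r'.get? name = some w ∧ ∀ x, x ∈ w ↔ x ∈ v
  vnodup : v.Nodup

-- ---- graph lemmas ----

theorem pvC_succ (D : PySem.Dict String (List String)) (n : Nat) (a : String) :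
    pvC D (n+1) a = pvC D n a ∪ (pvC D n a).biUnion (pvChildF D) := rfl

theorem pvC_mono_succ (D : PySem.Dict String (List String)) (n : Nat) (a : String) :
    pvC D n a ⊆ pvC D (n+1) a := by
  rw [pvC_succ]; exact Finset.subset_union_left

theorem pvChildF_subset_keys (D : PySem.Dict String (List String)) (a : String) :
    pvChildF D a ⊆ D.keys.toFinset := by
  intro x hx
  simp only [pvChildF, List.mem_toFinset, List.mem_filter] at hx
  rw [List.mem_toFinset]
  exact (PySem.Dict.contains_iff_mem_keys D x).1 (by simpa using hx.2)

theorem pvC_subset_keys (D : PySem.Dict String (List String)) (n : Nat) (a : String) :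
    pvC D n a ⊆ D.keys.toFinset := by
  induction n with
  | zero => exact pvChildF_subset_keys D a
  | succ n ih =>
    rw [pvC_succ]
    refine Finset.union_subset ih ?_
    intro x hx
    rcases Finset.mem_biUnion.1 hx with ⟨b, _, hb⟩
    exact pvChildF_subset_keys D b hb

theorem pvC_stable_forever (D : PySem.Dict String (List String)) (a : String) (n : Nat)
    (h : pvC D (n+1) a = pvC D n a) : ∀ m, n ≤ m → pvC D m a = pvC D n a := by
  intro m hm
  induction m with
  | zero => simpa [Nat.le_zero.1 hm]
  | succ m ih =>
    rcases Nat.lt_or_ge n (m+1) with hlt | hge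
    · have hnm : n ≤ m := Nat.lt_succ_iff.1 hlt
      have hm' := ih hnm
      calc pvC D (m+1) a = pvC D m a ∪ (pvC D m a).biUnion (pvChildF D) := rfl
        _ = pvC D n a ∪ (pvC D n a).biUnion (pvChildF D) := by rw [hm']
        _ = pvC D n a := h
    · have hEq : n = m + 1 := by omega
      rw [hEq]

theorem pvC_exists_stable (D : PySem.Dict String (List String)) (a : String) :
    ∃ n ≤ D.keys.toFinset.card, pvC D (n+1) a = pvC D n a := by
  by_contra hcon
  push_neg at hcon
  have grow : ∀ n ≤ D.keys.toFinset.card, n ≤ (pvC D n a).card := by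
    intro n hn
    induction n with
    | zero => omega
    | succ n ih =>
      have h1 : n ≤ (pvC D n a).card := ih (by omega)
      have hne := hcon n (by omega)
      have hss : pvC D n a ⊂ pvC D (n+1) a :=
        Finset.ssubset_iff_subset_ne.2 ⟨pvC_mono_succ D n a, fun h => hne h.symm⟩
      have := Finset.card_lt_card hss
      omega
  have h1 := grow D.keys.toFinset.card le_rfl
  have h2 : (pvC D D.keys.toFinset.card a).card ≤ D.keys.toFinset.card :=
    Finset.card_le_card (pvC_subset_keys D _ a)
  have hne := hcon D.keys.toFinset.card le_rfl
  have hss : pvC D D.keys.toFinset.card a ⊂ pvC D (D.keys.toFinset.card + 1) a :=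
    Finset.ssubset_iff_subset_ne.2 ⟨pvC_mono_succ D _ a, fun h => hne h.symm⟩
  have h3 := Finset.card_lt_card hss
  have h4 : (pvC D (D.keys.toFinset.card + 1) a).card ≤ D.keys.toFinset.card :=
    Finset.card_le_card (pvC_subset_keys D _ a)
  omega

theorem pvDset_fix (D : PySem.Dict String (List String)) (a : String) :
    pvC D (D.keys.toFinset.card + 1) a = pvDset D a := by
  rcases pvC_exists_stable D a with ⟨n, hn, hst⟩
  have h1 := pvC_stable_forever D a n hst _ hn
  have h2 := pvC_stable_forever D a n hst _ (by omega : n ≤ D.keys.toFinset.card + 1)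
  unfold pvDset
  rw [h1, h2]

theorem pvDset_closed (D : PySem.Dict String (List String)) {a b : String}
    (hb : b ∈ pvDset D a) : pvChildF D b ⊆ pvDset D a := by
  intro x hx
  rw [← pvDset_fix]
  rw [pvC_succ]
  exact Finset.mem_union_right _ (Finset.mem_biUnion.2 ⟨b, hb, hx⟩)

theorem pvChildF_subset_pvDset (D : PySem.Dict String (List String)) (a : String) :
    pvChildF D a ⊆ pvDset D a := by
  intro x hx
  unfold pvDset
  induction D.keys.toFinset.card with
  | zero => exact hx
  | succ n ih => exact pvC_mono_succ D n a ih

theorem pvDset_trans (D : PySem.Dict String (List String)) {a b : String}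
    (hb : b ∈ pvDset D a) : pvDset D b ⊆ pvDset D a := by
  have : ∀ n, pvC D n b ⊆ pvDset D a := by
    intro n
    induction n with
    | zero => exact fun x hx => pvDset_closed D hb hx
    | succ n ih =>
      rw [pvC_succ]
      refine Finset.union_subset ih ?_
      intro x hx
      rcases Finset.mem_biUnion.1 hx with ⟨e, he, hx⟩
      exact pvDset_closed D (ih he) hx
  exact this _

theorem pvDset_decomp (D : PySem.Dict String (List String)) {a k : String}
    (hk : k ∈ pvDset D a) : ∃ d ∈ pvChildF D a, k = d ∨ k ∈ pvDset D d := by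
  have : ∀ n k, k ∈ pvC D n a → ∃ d ∈ pvChildF D a, k = d ∨ k ∈ pvDset D d := by
    intro n
    induction n with
    | zero => exact fun k hk => ⟨k, hk, Or.inl rfl⟩
    | succ n ih =>
      intro k hk
      rw [pvC_succ] at hk
      rcases Finset.mem_union.1 hk with hk | hk
      · exact ih k hk
      · rcases Finset.mem_biUnion.1 hk with ⟨b, hb, hkb⟩
        rcases ih b hb with ⟨d, hd, hbd⟩
        refine ⟨d, hd, Or.inr ?_⟩
        rcases hbd with hbd | hbd
        · exact pvChildF_subset_pvDset D d (hbd ▸ hkb)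
        · exact pvDset_closed D hbd hkb
  exact this _ k hk

theorem pvMem_childF (D : PySem.Dict String (List String)) {a d : String} :
    d ∈ pvChildF D a ↔ d ∈ D.getD a [] ∧ D.contains d = true := by
  simp [pvChildF, List.mem_filter]

-- ---- measure lemmas ----

theorem pvContains_mono {r r' : PySem.Dict String (List String)}
    (h : ∀ k, r.contains k = true → r'.get? k = r.get? k) :
    ∀ k, r.contains k = true → r'.contains k = true := by
  intro k hk
  rw [PySem.Dict.contains_eq_isSome_get?, h k hk, ← PySem.Dict.contains_eq_isSome_get?]
  exact hk

theorem pvMu_mono (D : PySem.Dict String (List String)) {r r' : PySem.Dict String (List String)}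
    (h : ∀ k, r.contains k = true → r'.contains k = true) (name : String) :
    pvMu D r' name ≤ pvMu D r name := by
  apply Finset.card_le_card
  intro k hk
  simp only [Finset.mem_filter] at hk ⊢
  refine ⟨hk.1, ?_⟩
  cases hc : r.contains k with
  | false => rfl
  | true =>
    have := h k hc
    rw [hk.2] at this
    exact Bool.noConfusion this

theorem pvMu_pos (D : PySem.Dict String (List String)) {r : PySem.Dict String (List String)}
    {name : String} (h : r.contains name = false) : 1 ≤ pvMu D r name := by
  have : name ∈ (insert name (pvDset D name)).filter (fun k => r.contains k = false) := by
    simp [Finset.mem_filter, h]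
  have h2 := Finset.card_pos.2 ⟨name, this⟩
  unfold pvMu
  omega

theorem pvMu_child_lt (D : PySem.Dict String (List String)) {r : PySem.Dict String (List String)}
    {name d : String} (hd : d ∈ pvChildF D name) (hunres : r.contains name = false)
    (hacy : name ∉ pvDset D name) : pvMu D r d < pvMu D r name := by
  apply Finset.card_lt_card
  constructor
  · intro k hk
    simp only [Finset.mem_filter, Finset.mem_insert] at hk ⊢
    refine ⟨?_, hk.2⟩
    rcases hk.1 with rfl | hk1
    · exact Or.inr (pvChildF_subset_pvDset D name hd)
    · exact Or.inr (pvDset_trans D (pvChildF_subset_pvDset D name hd) hk1)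
  · intro hsub
    have hmem : name ∈ (insert name (pvDset D name)).filter (fun k => r.contains k = false) := by
      simp [Finset.mem_filter, hunres]
    have := hsub hmem
    simp only [Finset.mem_filter, Finset.mem_insert] at this
    rcases this.1 with rfl | hmem2
    · exact hacy (pvChildF_subset_pvDset D name hd)
    · exact hacy (pvDset_trans D (pvChildF_subset_pvDset D name hd) hmem2)

theorem pvMu_split (D : PySem.Dict String (List String))
    {r rd : PySem.Dict String (List String)} {name d : String}
    (hd : d ∈ pvChildF D name)
    (hpres : ∀ k, r.contains k = true → rd.contains k = true)
    (hcompl : ∀ k ∈ insert d (pvDset D d), rd.contains k = true) :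
    pvMu D rd name + pvMu D r d ≤ pvMu D r name := by
  classical
  set A := (insert name (pvDset D name)).filter (fun k => rd.contains k = false) with hA
  set B := (insert d (pvDset D d)).filter (fun k => r.contains k = false) with hB
  have hdisj : Disjoint A B := by
    rw [Finset.disjoint_left]
    intro k hk hkB
    simp only [hA, Finset.mem_filter] at hk
    simp only [hB, Finset.mem_filter] at hkB
    have := hcompl k hkB.1
    rw [hk.2] at this
    exact Bool.noConfusion this
  have hsub : A ∪ B ⊆ (insert name (pvDset D name)).filter (fun k => r.contains k = false) := by
    intro k hk
    rcases Finset.mem_union.1 hk with hk | hk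
    · simp only [hA, Finset.mem_filter] at hk
      simp only [Finset.mem_filter]
      refine ⟨hk.1, ?_⟩
      cases hcase : r.contains k with
      | false => rfl
      | true =>
        have := hpres k hcase
        rw [hk.2] at this
        exact Bool.noConfusion this
    · simp only [hB, Finset.mem_filter, Finset.mem_insert] at hk
      simp only [Finset.mem_filter, Finset.mem_insert]
      refine ⟨?_, hk.2⟩
      rcases hk.1 with rfl | hk1
      · exact Or.inr (pvChildF_subset_pvDset D name hd)
      · exact Or.inr (pvDset_trans D (pvChildF_subset_pvDset D name hd) hk1)
  calc pvMu D rd name + pvMu D r d = A.card + B.card := rfl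
    _ = (A ∪ B).card := (Finset.card_union_of_disjoint hdisj).symm
    _ ≤ _ := Finset.card_le_card hsub

theorem pvMu_le (D : PySem.Dict String (List String)) (r : PySem.Dict String (List String))
    (name : String) : pvMu D r name ≤ D.keys.toFinset.card + 1 := by
  calc pvMu D r name ≤ (insert name (pvDset D name)).card :=
        Finset.card_le_card (Finset.filter_subset _ _)
    _ ≤ (pvDset D name).card + 1 := Finset.card_insert_le _ _
    _ ≤ D.keys.toFinset.card + 1 := by
        have := Finset.card_le_card (pvC_subset_keys D (D.keys.toFinset.card) name)
        unfold pvDset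
        omega

theorem pvItemsLen_update (ps : List (String × List String)) :
    ∀ d : PySem.Dict String (List String), (PySem.Dict.update d ps).items.length ≤ d.items.length + ps.length := by
  induction ps with
  | nil => intro d; simp [PySem.Dict.update]
  | cons p ps ih =>
    intro d
    have h1 := ih (d.insert p.1 p.2)
    have h2 : (d.insert p.1 p.2).items.length ≤ d.items.length + 1 := by
      unfold PySem.Dict.insert
      split <;> simp
    calc (PySem.Dict.update d (p :: ps)).items.length
        = (PySem.Dict.update (d.insert p.1 p.2) ps).items.length := by
          simp [PySem.Dict.update]
      _ ≤ (d.insert p.1 p.2).items.length + ps.length := h1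
      _ ≤ d.items.length + 1 + ps.length := by omega
      _ = d.items.length + (p :: ps).length := by simp; omega

theorem pvKeysCard_le (l : List (String × List String)) :
    (PySem.Dict.ofList l).keys.toFinset.card ≤ l.length := by
  have h1 : (PySem.Dict.ofList l).keys.toFinset.card ≤ (PySem.Dict.ofList l).keys.length :=
    List.toFinset_card_le _
  have h2 : (PySem.Dict.ofList l).keys.length = (PySem.Dict.ofList l).items.length := by
    simp [PySem.Dict.keys]
  have h3 := pvItemsLen_update l PySem.Dict.empty
  have h4 : (PySem.Dict.empty : PySem.Dict String (List String)).items.length = 0 := rfl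
  have h5 : (PySem.Dict.ofList l) = PySem.Dict.update PySem.Dict.empty l := rfl
  rw [h5] at h1 h2 ⊢
  omega

-- ---- Set helper lemmas ----

theorem pvNodup_contrib (D r : PySem.Dict String (List String)) :
    ∀ (ds : List String) (o : PySem.Set String), o.Nodup → (ds.foldl (pvBContribF D r) o).Nodup := by
  intro ds
  induction ds with
  | nil => exact fun o h => h
  | cons d ds ih =>
    intro o ho
    simp only [List.foldl_cons]
    apply ih
    unfold pvBContribF
    split
    · exact PySem.Set.nodup_union _ _ ho
    · exact PySem.Set.nodup_add _ _ ho

theorem pvSorted_congr (a b : List String) (ha : a.Nodup) (hb : b.Nodup)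
    (h : ∀ x, x ∈ a ↔ x ∈ b) :
    PySem.List.sorted a (fun x => x) = PySem.List.sorted b (fun x => x) := by
  apply PySem.List.sorted_eq_sorted_of_perm a b (fun x => x) (fun x y h => h)
  exact (List.perm_ext_iff_of_nodup ha hb).2 h

-- ---- pvBFirstPending lemmas ----

theorem pvBFirstPending_append (D r : PySem.Dict String (List String))
    (pre ds : List String)
    (hpre : ∀ d ∈ pre, D.contains d = true → r.contains d = true) :
    pvBFirstPending D r (pre ++ ds) = pvBFirstPending D r ds := by
  induction pre with
  | nil => rfl
  | cons p pre ih =>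
    simp only [List.cons_append, pvBFirstPending]
    have : (D.contains p && !(r.contains p)) = false := by
      cases hc : D.contains p with
      | false => rfl
      | true => simp [hpre p (by simp) hc]
    rw [this]
    simp only [Bool.false_eq_true, if_false]
    exact ih (fun d hd => hpre d (by simp [hd]))

theorem pvContains_get? {r : PySem.Dict String (List String)} {k : String}
    (h : r.contains k = true) : ∃ w, r.get? k = some w := by
  have h2 : (r.get? k).isSome = true := by
    rw [← PySem.Dict.contains_eq_isSome_get?]; exact h
  exact Option.isSome_iff_exists.1 h2

-- ---- the main simulation lemma ----

theorem pvMain (D : PySem.Dict String (List String)) :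
    ∀ (name : String) (r : PySem.Dict String (List String)),
      D.contains name = true →
      (∀ k ∈ insert name (pvDset D name), k ∉ pvDset D k) →
      pvInv2 D r →
      ∃ v r' c, PvOut D name r v r' c := by
  suffices H : ∀ (ν : Nat) (name : String) (r : PySem.Dict String (List String)),
      D.contains name = true →
      (∀ k ∈ insert name (pvDset D name), k ∉ pvDset D k) →
      pvInv2 D r → pvMu D r name = ν →
      ∃ v r' c, PvOut D name r v r' c by
    intro name r h1 h2 h3
    exact H _ name r h1 h2 h3 rfl
  intro ν
  induction ν using Nat.strong_induction_on with
  | _ ν IH =>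
  intro name r hkey hacy hinv hν
  have hname_acy : name ∉ pvDset D name := hacy name (Finset.mem_insert_self _ _)
  by_cases hres : r.contains name = true
  · -- name already resolved: A returns set(resolved[name]), B pops it
    obtain ⟨w, hw⟩ := pvContains_get? hres
    refine ⟨PySem.Set.ofList w, r, 1, ?_, ?_, ?_, ?_, ?_, ?_, ?_, ?_, ?_, ?_⟩
    · intro f hf
      obtain ⟨f', rfl⟩ : ∃ f', f = f' + 1 := ⟨f - 1, by omega⟩
      simp only [pvAResolve]
      rw [hw]
    · intro g stack
      have h1 : 1 + g = g + 1 := by omega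
      rw [h1]
      simp [pvBStep, hres]
    · intro _; exact ⟨rfl, rfl⟩
    · intro h; rw [h] at hres; exact Bool.noConfusion hres
    · intro k _; rfl
    · intro k hk; exact Or.inl hk
    · intro k hk
      rcases Finset.mem_insert.1 hk with rfl | hk
      · exact hres
      · exact hinv name hres k hk
    · exact hinv
    · exact ⟨w, hw, fun x => (PySem.Set.mem_ofList w x).symm⟩
    · exact PySem.Set.nodup_ofList w
  · -- name unresolved: run the dependency loop
    have hresF : r.contains name = false := by
      cases h : r.contains name
      · rfl
      · exact absurd h hres
    have loop : ∀ (ds pre : List String) (out0 : PySem.Set String)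
        (rc : PySem.Dict String (List String)),
        D.getD name [] = pre ++ ds →
        (∀ d ∈ pre, D.contains d = true → rc.contains d = true) →
        pvInv2 D rc →
        rc.contains name = false →
        pvMu D rc name ≤ ν →
        ∃ out1 r1 c1,
          (∀ f, pvMu D rc name ≤ f → pvALoop D f ds out0 rc = some (out1, r1)) ∧
          (∀ g stack, pvBStep D (c1 + g) (name :: stack) rc = pvBStep D g (name :: stack) r1) ∧
          (c1 + 3 * pvMu D r1 name ≤ 3 * pvMu D rc name) ∧
          (∀ k, rc.contains k = true → r1.get? k = rc.get? k) ∧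
          (∀ k, r1.contains k = true → rc.contains k = true ∨ k ∈ pvDset D name) ∧
          (∀ d ∈ ds, D.contains d = true → r1.contains d = true) ∧
          pvInv2 D r1 ∧
          (∀ o', (∀ x, x ∈ o' ↔ x ∈ out0) →
            ∀ x, x ∈ List.foldl (pvBContribF D r1) o' ds ↔ x ∈ out1) ∧
          (out0.Nodup → out1.Nodup) := by
      intro ds
      induction ds with
      | nil =>
        intro pre out0 rc hfull hpre hinvc hunresc hmu
        refine ⟨out0, rc, 0, ?_, ?_, by omega, fun k _ => rfl, fun k hk => Or.inl hk,
          by simp, hinvc, ?_, fun h => h⟩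
        · intro f _; simp [pvALoop]
        · intro g stack; rw [Nat.zero_add]
        · intro o' ho x; simpa using ho x
      | cons d ds ihds =>
        intro pre out0 rc hfull hpre hinvc hunresc hmu
        have hmupos : 1 ≤ pvMu D rc name := pvMu_pos D hunresc
        by_cases hkd : D.contains d = true
        · have hdchild : d ∈ pvChildF D name :=
            (pvMem_childF D).2 ⟨by rw [hfull]; simp, hkd⟩
          by_cases hrd : rc.contains d = true
          · -- dependency already resolved
            obtain ⟨w, hw⟩ := pvContains_get? hrd
            obtain ⟨out1, r1, c1, LA, LB, LC, Lpres, Lloc, Lpost, Linv, Lmem, Lnd⟩ :=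
              ihds (pre ++ [d]) (PySem.Set.union out0 (PySem.Set.ofList w)) rc
                (by rw [hfull]; simp)
                (by intro e he hke
                    rcases List.mem_append.1 he with he | he
                    · exact hpre e he hke
                    · simp at he; exact he ▸ hrd)
                hinvc hunresc hmu
            refine ⟨out1, r1, c1, ?_, LB, LC, Lpres, Lloc, ?_, Linv, ?_, ?_⟩
            · intro f hf
              obtain ⟨f', rfl⟩ : ∃ f', f = f' + 1 := ⟨f - 1, by omega⟩
              simp only [pvALoop, hkd, if_true]
              have hAr : pvAResolve D (f' + 1) d rc = some (PySem.Set.ofList w, rc) := by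
                simp only [pvAResolve]; rw [hw]
              rw [hAr]
              exact LA (f' + 1) hf
            · intro e he hke
              rcases List.mem_cons.1 he with he | he
              · exact he ▸ pvContains_mono Lpres d hrd
              · exact Lpost e he hke
            · intro o' ho x
              simp only [List.foldl_cons]
              refine Lmem (pvBContribF D r1 o' d) ?_ x
              intro y
              have hget : r1.getD d [] = w := by
                have := Lpres d hrd
                simp [PySem.Dict.getD, this, hw]
              simp only [pvBContribF, hkd, if_true, hget]
              rw [PySem.Set.mem_union, PySem.Set.mem_union]
              rw [ho y]
            · intro h
              exact Lnd (PySem.Set.nodup_union _ _ h)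
          · -- unresolved CTE dependency: recurse (A) / push (B)
            have hrdF : rc.contains d = false := by
              cases h : rc.contains d
              · rfl
              · exact absurd h hrd
            have hacyd : ∀ k ∈ insert d (pvDset D d), k ∉ pvDset D k := by
              intro k hk
              apply hacy
              rcases Finset.mem_insert.1 hk with rfl | hk
              · exact Finset.mem_insert_of_mem (pvChildF_subset_pvDset D name hdchild)
              · exact Finset.mem_insert_of_mem
                  (pvDset_trans D (pvChildF_subset_pvDset D name hdchild) hk)
            have hlt : pvMu D rc d < pvMu D rc name :=
              pvMu_child_lt D hdchild hunresc hname_acy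
            obtain ⟨vd, rd, cd, Ch⟩ :=
              IH (pvMu D rc d) (by omega) d rc hkd hacyd hinvc rfl
            have hnrd : rd.contains name = false := by
              cases hc : rd.contains name
              · rfl
              · exfalso
                rcases Ch.sidelocal name hc with h | h
                · rw [hunresc] at h; exact Bool.noConfusion h
                · rcases Finset.mem_insert.1 h with rfl | h
                  · exact hname_acy (pvChildF_subset_pvDset D name hdchild)
                  · exact hname_acy
                      (pvDset_trans D (pvChildF_subset_pvDset D name hdchild) h)
            have hmu_rd : pvMu D rd name ≤ pvMu D rc name :=
              pvMu_mono D (pvContains_mono Ch.pres) name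
            obtain ⟨out1, r1, c1, LA, LB, LC, Lpres, Lloc, Lpost, Linv, Lmem, Lnd⟩ :=
              ihds (pre ++ [d]) (PySem.Set.union out0 vd) rd
                (by rw [hfull]; simp)
                (by intro e he hke
                    rcases List.mem_append.1 he with he | he
                    · exact pvContains_mono Ch.pres e (hpre e he hke)
                    · simp at he
                      exact he ▸ Ch.compl d (Finset.mem_insert_self _ _))
                Ch.inv2 hnrd (le_trans hmu_rd hmu)
            have hr1d : r1.get? d = rd.get? d :=
              Lpres d (Ch.compl d (Finset.mem_insert_self _ _))
            refine ⟨out1, r1, 1 + cd + c1, ?_, ?_, ?_, ?_, ?_, ?_, Linv, ?_, ?_⟩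
            · intro f hf
              simp only [pvALoop, hkd, if_true]
              rw [Ch.runA f (by omega)]
              exact LA f (by omega)
            · intro g stack
              have e1 : pvBFirstPending D rc (D.getD name []) = some d := by
                rw [hfull, pvBFirstPending_append D rc pre _ hpre]
                simp [pvBFirstPending, hkd, hrdF]
              have h1 : 1 + cd + c1 + g = (cd + (c1 + g)) + 1 := by omega
              rw [h1]
              calc pvBStep D ((cd + (c1 + g)) + 1) (name :: stack) rc
                  = pvBStep D (cd + (c1 + g)) (d :: name :: stack) rc := by
                    simp [pvBStep, hunresc, e1]
                _ = pvBStep D (c1 + g) (name :: stack) rd := Ch.runB _ _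
                _ = pvBStep D g (name :: stack) r1 := LB g stack
            · have h1 := Ch.cunres hrdF
              have h2 := pvMu_split D hdchild (pvContains_mono Ch.pres)
                Ch.compl
              omega
            · intro k hk
              rw [Lpres k (pvContains_mono Ch.pres k hk), Ch.pres k hk]
            · intro k hk
              rcases Lloc k hk with hk | hk
              · rcases Ch.sidelocal k hk with h | h
                · exact Or.inl h
                · refine Or.inr ?_
                  rcases Finset.mem_insert.1 h with rfl | h
                  · exact pvChildF_subset_pvDset D name hdchild
                  · exact pvDset_trans D (pvChildF_subset_pvDset D name hdchild) h
              · exact Or.inr hk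
            · intro e he hke
              rcases List.mem_cons.1 he with he | he
              · exact he ▸ pvContains_mono Lpres d (Ch.compl d (Finset.mem_insert_self _ _))
              · exact Lpost e he hke
            · intro o' ho x
              simp only [List.foldl_cons]
              refine Lmem (pvBContribF D r1 o' d) ?_ x
              intro y
              obtain ⟨wgot, hwgot, hwv⟩ := Ch.value
              have hget : r1.getD d [] = wgot := by
                simp [PySem.Dict.getD, hr1d, hwgot]
              simp only [pvBContribF, hkd, if_true, hget]
              rw [PySem.Set.mem_union, PySem.Set.mem_union, PySem.Set.mem_ofList]
              rw [ho y, hwv y]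
            · intro h
              exact Lnd (PySem.Set.nodup_union _ _ h)
        · -- physical dependency
          have hkdF : D.contains d = false := by
            cases h : D.contains d
            · rfl
            · exact absurd h hkd
          obtain ⟨out1, r1, c1, LA, LB, LC, Lpres, Lloc, Lpost, Linv, Lmem, Lnd⟩ :=
            ihds (pre ++ [d]) (PySem.Set.add out0 d) rc
              (by rw [hfull]; simp)
              (by intro e he hke
                  rcases List.mem_append.1 he with he | he
                  · exact hpre e he hke
                  · simp at he; rw [he, hkdF] at hke; exact Bool.noConfusion hke)
              hinvc hunresc hmu
          refine ⟨out1, r1, c1, ?_, LB, LC, Lpres, Lloc, ?_, Linv, ?_, ?_⟩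
          · intro f hf
            simp only [pvALoop, hkdF, Bool.false_eq_true, if_false]
            exact LA f hf
          · intro e he hke
            rcases List.mem_cons.1 he with he | he
            · rw [he, hkdF] at hke; exact Bool.noConfusion hke
            · exact Lpost e he hke
          · intro o' ho x
            simp only [List.foldl_cons]
            refine Lmem (pvBContribF D r1 o' d) ?_ x
            intro y
            simp only [pvBContribF, hkdF, Bool.false_eq_true, if_false]
            rw [PySem.Set.mem_add, PySem.Set.mem_add]
            rw [ho y]
          · intro h
            exact Lnd (PySem.Set.nodup_add _ _ h)
    obtain ⟨out1, r1, c1, LA, LB, LC, Lpres, Lloc, Lpost, Linv, Lmem, Lnd⟩ :=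
      loop (D.getD name []) [] PySem.Set.empty r rfl (by simp) hinv hresF (le_of_eq hν)
    have hnr1 : r1.contains name = false := by
      cases hc : r1.contains name
      · rfl
      · exfalso
        rcases Lloc name hc with h | h
        · rw [hresF] at h; exact Bool.noConfusion h
        · exact hname_acy h
    have e2 : pvBFirstPending D r1 (D.getD name []) = none := by
      rw [show D.getD name [] = D.getD name [] ++ [] by simp,
        pvBFirstPending_append D r1 _ [] Lpost]
      rfl
    have hout1nd : out1.Nodup := Lnd List.nodup_nil
    have hfinal : pvBFinal D r1 name = PySem.List.sorted out1 (fun x => x) := by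
      unfold pvBFinal
      apply pvSorted_congr
      · exact pvNodup_contrib D r1 _ _ List.nodup_nil
      · exact hout1nd
      · exact Lmem PySem.Set.empty (fun x => Iff.rfl)
    refine ⟨out1, r1.insert name (PySem.List.sorted out1 (fun x => x)), c1 + 1,
      ?_, ?_, ?_, ?_, ?_, ?_, ?_, ?_, ?_, ?_⟩
    · intro f hf
      obtain ⟨f', rfl⟩ : ∃ f', f = f' + 1 := ⟨f - 1, by omega⟩
      simp only [pvAResolve]
      rw [(PySem.Dict.get?_eq_none_iff_contains r name).2 hresF]
      rw [LA f' (by omega)]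
    · intro g stack
      have h1 : c1 + 1 + g = c1 + (1 + g) := by omega
      rw [h1, LB (1 + g) stack]
      have h2 : 1 + g = g + 1 := by omega
      rw [h2]
      simp [pvBStep, hnr1, e2, hfinal]
    · intro h; rw [h] at hresF; exact Bool.noConfusion hresF
    · intro _
      have := pvMu_pos D hnr1
      omega
    · intro k hk
      have hkne : k ≠ name := by
        intro h; subst h; rw [hresF] at hk; exact Bool.noConfusion hk
      rw [PySem.Dict.get?_insert, if_neg hkne]
      exact Lpres k hk
    · intro k hk
      rw [PySem.Dict.contains_insert] at hk
      rcases Bool.or_eq_true_iff.1 hk with hk | hk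
      · have : k = name := by simpa using hk
        subst this
        exact Or.inr (Finset.mem_insert_self _ _)
      · rcases Lloc k hk with h | h
        · exact Or.inl h
        · exact Or.inr (Finset.mem_insert_of_mem h)
    · intro k hk
      rw [PySem.Dict.contains_insert]
      rcases Finset.mem_insert.1 hk with rfl | hk
      · simp
      · rcases pvDset_decomp D hk with ⟨d, hd, hkd⟩
        have hdfull : d ∈ D.getD name [] := ((pvMem_childF D).1 hd).1
        have hdkey : D.contains d = true := ((pvMem_childF D).1 hd).2
        have hr1d : r1.contains d = true := Lpost d hdfull hdkey
        rcases hkd with rfl | hkd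
        · simp [hr1d]
        · simp [Linv d hr1d k hkd]
    · intro k hk x hx
      rw [PySem.Dict.contains_insert] at hk
      rw [PySem.Dict.contains_insert]
      rcases Bool.or_eq_true_iff.1 hk with hk | hk
      · have hkn : k = name := by simpa using hk
        rw [hkn] at hx
        rcases pvDset_decomp D hx with ⟨d, hd, hkd⟩
        have hdfull : d ∈ D.getD name [] := ((pvMem_childF D).1 hd).1
        have hdkey : D.contains d = true := ((pvMem_childF D).1 hd).2
        have hr1d : r1.contains d = true := Lpost d hdfull hdkey
        rcases hkd with rfl | hkd
        · simp [hr1d]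
        · simp [Linv d hr1d x hkd]
      · simp [Linv k hk x hx]
    · refine ⟨PySem.List.sorted out1 (fun x => x), PySem.Dict.get?_insert_self _ _ _, ?_⟩
      intro x
      exact PySem.List.mem_sorted out1 (fun x => x) false x
    · exact hout1nd

-- ---- top-level assembly ----

theorem pvTop (D : PySem.Dict String (List String)) (L : Nat)
    (hL : D.keys.toFinset.card ≤ L) :
    ∀ (ns : List String) (racc : PySem.Dict String (List String)),
      (∀ s ∈ ns, D.contains s = true → ∀ k ∈ insert s (pvDset D s), k ∉ pvDset D k) →
      pvInv2 D racc →
      List.foldl (fun resolved name =>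
        if D.contains name then
          match pvAResolve D (L + 2) name resolved with
          | some (_, r') => r'
          | none => resolved
        else resolved) racc ns
      = List.foldl (fun resolved name =>
        if D.contains name then
          match pvBStep D (3 * L + 8) [name] resolved with
          | some r' => r'
          | none => resolved
        else resolved) racc ns := by
  intro ns
  induction ns with
  | nil => intro racc _ _; rfl
  | cons n ns ih =>
    intro racc hs hinv
    simp only [List.foldl_cons]
    by_cases hkn : D.contains n = true
    · obtain ⟨v, r', c, O⟩ := pvMain D n racc hkn (hs n (by simp) hkn) hinv
      have hmu : pvMu D racc n ≤ L + 1 := le_trans (pvMu_le D racc n) (by omega)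
      have hA : pvAResolve D (L + 2) n racc = some (v, r') := O.runA _ (by omega)
      have hc : c + 1 ≤ 3 * L + 8 := by
        by_cases hr : racc.contains n = true
        · have := (O.cres hr).1; omega
        · have hrF : racc.contains n = false := by
            cases h : racc.contains n
            · rfl
            · exact absurd h hr
          have h1 := O.cunres hrF
          omega
      have hB : pvBStep D (3 * L + 8) [n] racc = some r' := by
        have h1 : 3 * L + 8 = c + (3 * L + 8 - c) := by omega
        rw [h1, O.runB]
        obtain ⟨g', hg⟩ : ∃ g', 3 * L + 8 - c = g' + 1 := ⟨3 * L + 8 - c - 1, by omega⟩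
        rw [hg]
        simp [pvBStep]
      simp only [hkn, if_true, hA, hB]
      exact ih r' (fun s hsm => hs s (by simp [hsm])) O.inv2
    · have hknF : D.contains n = false := by
        cases h : D.contains n
        · rfl
        · exact absurd h hkn
      simp only [hknF, Bool.false_eq_true, if_false]
      exact ih racc (fun s hsm => hs s (by simp [hsm])) hinv

-- ===== VERDICT =====
theorem resolve_cte_to_physical_py_spec : Claim_equal_resolve_cte_to_physical_py := by
  unfold Claim_equal_resolve_cte_to_physical_py
  intro names deps _hdom hpre
  unfold Spec_resolve_cte_to_physical_py
  unfold resolve_cte_to_physical_py resolve_cte_to_physical_py_alt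
  exact congrArg PySem.Dict.items
    (pvTop (PySem.Dict.ofList deps) deps.length (pvKeysCard_le deps) names PySem.Dict.empty
      (fun s hs hc => hpre s hs hc)
      (by intro k hk
          rw [PySem.Dict.contains_empty] at hk
          exact Bool.noConfusion hk))
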